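-- pv_equiv track=rewrite | github.com/aciderix/Graph-Systems-Exploration | numerical_semigroups/phases/proof_L4.py | enumerate_d1_full
-- ===== SOURCE A (Python) =====
-- def enumerate_d1_full(m, max_genus):
--     """Return list of (L, c, g, W) for all (m, m-1) semigroups."""
--     n = m - 1
--     results = []
--     a = [0] * n
--
--     def is_decomposable(r, a_vals):
--         r1_res = r + 1
--         for i in range(n):
--             i_res = i + 1
--             j_res = (r1_res - i_res) % m
--             if j_res == 0: continue
--             j = j_res - 1
--             overflow = (i_res + j_res) // m
--             if a_vals[i] + a_vals[j] + overflow == a_vals[r]: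
--                 return True
--         return False
--
--     def backtrack(pos, g_so_far):
--         if pos == n:
--             n_decomp = sum(1 for r in range(n) if is_decomposable(r, a))
--             e = 1 + n - n_decomp
--             if e == m - 1:
--                 F = max(((i+1) + a[i]*m) for i in range(n)) - m
--                 c = F + 1; g = g_so_far; L = c - g; W = e * L - c
--                 results.append((L, c, g, W))
--             return
--         remaining = n - pos - 1
--         max_val = max_genus - g_so_far - remaining
--         for v in range(1, max_val + 1):
--             a[pos] = v
--             valid = True
--             r = pos + 1
--             for prev in range(pos):
--                 p_res = prev + 1; s = r + p_res; s_mod = s % m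
--                 if s_mod != 0:
--                     ti = s_mod - 1
--                     if ti <= pos:
--                         if s < m:
--                             if a[prev] + v < a[ti]: valid = False; break
--                         else:
--                             if a[prev] + v < a[ti] + 1: valid = False; break
--             if valid:
--                 for p1 in range(pos):
--                     for p2 in range(p1, pos):
--                         s12 = (p1+1) + (p2+1); s12_mod = s12 % m
--                         if s12_mod == r:
--                             if s12 < m:
--                                 if a[p1] + a[p2] < v: valid = False; break
--                             else:
--                                 if a[p1] + a[p2] < v + 1: valid = False; break
--                     if not valid: break
--             if valid:
--                 backtrack(pos + 1, g_so_far + v)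
--
--     backtrack(0, 0)
--     return results
-- ===== SOURCE B (Python) =====
-- def enumerate_d1_full(m, max_genus):
--     """Return list of (L, c, g, W) for all (m, m-1) semigroups.
--
--     Level-by-level (breadth-first) enumeration: instead of a recursive DFS
--     mutating one shared array, keep a frontier of (prefix, genus) pairs and
--     extend every prefix by one Apery value per round; ascending extension
--     order keeps the output in the same lexicographic order as the DFS.
--     """
--     n = m - 1
--
--     def pair_ok(pre, v, pos):
--         r = pos + 1
--         for prev in range(pos):
--             s = r + (prev + 1)
--             s_mod = s % m
--             if s_mod != 0 and s_mod - 1 <= pos: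
--                 ti = s_mod - 1
--                 bound = pre[ti] if ti < pos else v
--                 if pre[prev] + v < (bound if s < m else bound + 1):
--                     return False
--         for p1 in range(pos):
--             for p2 in range(p1, pos):
--                 s12 = (p1 + 1) + (p2 + 1)
--                 if s12 % m == r:
--                     if pre[p1] + pre[p2] < (v if s12 < m else v + 1):
--                         return False
--         return True
--
--     def decomposable(a, r):
--         for i in range(n):
--             j_res = (r - i) % m
--             if j_res != 0:
--                 if a[i] + a[j_res - 1] + (i + 1 + j_res) // m == a[r]:
--                     return True
--         return False
--
--     frontier = [((), 0)]
--     for pos in range(n):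
--         tail = n - pos - 1
--         nxt = []
--         for pre, g in frontier:
--             for v in range(1, max_genus - g - tail + 1):
--                 if pair_ok(pre, v, pos):
--                     nxt.append((pre + (v,), g + v))
--         frontier = nxt
--
--     results = []
--     for a, g in frontier:
--         n_decomp = sum(1 for r in range(n) if decomposable(a, r))
--         e = 1 + n - n_decomp
--         if e == m - 1:
--             c = max((i + 1) + a[i] * m for i in range(n)) - m + 1
--             L = c - g
--             results.append((L, c, g, e * L - c))
--     return results
-- ===== Notes on version B (the rewrite author's own statement) =====
-- stated objective: alternative
-- what changed: Replaces the recursive depth-first backtracking over one shared mutable Apery array with an iterative breadth-first enumeration that rebuilds a frontier of (prefix, genus) pairs level by level and runs the leaf test over the finished frontier; ascending extension order preserves the DFS output order.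
import Mathlib
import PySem

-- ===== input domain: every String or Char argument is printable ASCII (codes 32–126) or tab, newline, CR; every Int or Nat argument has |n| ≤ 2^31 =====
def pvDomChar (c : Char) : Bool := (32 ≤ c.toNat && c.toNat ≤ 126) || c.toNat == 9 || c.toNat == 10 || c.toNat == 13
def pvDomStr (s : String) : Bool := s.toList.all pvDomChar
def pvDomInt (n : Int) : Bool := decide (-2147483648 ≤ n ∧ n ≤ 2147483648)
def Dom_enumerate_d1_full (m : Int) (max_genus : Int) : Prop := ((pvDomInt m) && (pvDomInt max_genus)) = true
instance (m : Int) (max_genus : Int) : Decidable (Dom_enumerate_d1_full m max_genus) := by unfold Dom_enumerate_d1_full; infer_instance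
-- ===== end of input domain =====

-- B replaces A's recursive DFS over one shared mutable array by an iterative
-- level-by-level (breadth-first) frontier of (prefix, genus) pairs (objective: alternative).

-- ===== PORT A =====
def pvAGet (a : List Int) (i : Int) : Int := PySem.List.pyGetD a i 0

def pvA_isDecomp (m n : Int) (a : List Int) (r : Int) : Bool :=
  (PySem.List.pyRange 0 n 1).any (fun i =>
    let j_res := PySem.Int.mod ((r + 1) - (i + 1)) m
    if j_res = 0 then false
    else
      let overflow := PySem.Int.floordiv ((i + 1) + j_res) m
      pvAGet a i + pvAGet a (j_res - 1) + overflow == pvAGet a r)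

def pvA_checkPrev (m : Int) (a : List Int) (pos v : Int) : Bool :=
  (PySem.List.pyRange 0 pos 1).all (fun prev =>
    let s := (pos + 1) + (prev + 1)
    let s_mod := PySem.Int.mod s m
    if s_mod ≠ 0 then
      let ti := s_mod - 1
      if ti ≤ pos then
        if s < m then !(pvAGet a prev + v < pvAGet a ti)
        else !(pvAGet a prev + v < pvAGet a ti + 1)
      else true
    else true)

def pvA_checkPairs (m : Int) (a : List Int) (pos v : Int) : Bool :=
  (PySem.List.pyRange 0 pos 1).all (fun p1 =>
    (PySem.List.pyRange p1 pos 1).all (fun p2 =>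
      let s12 := (p1 + 1) + (p2 + 1)
      if PySem.Int.mod s12 m = pos + 1 then
        if s12 < m then !(pvAGet a p1 + pvAGet a p2 < v)
        else !(pvAGet a p1 + pvAGet a p2 < v + 1)
      else true))

def pvA_leaf (m n : Int) (a : List Int) (g : Int) : List (Int × Int × Int × Int) :=
  let n_decomp := ((PySem.List.pyRange 0 n 1).map
    (fun r => if pvA_isDecomp m n a r then (1 : Int) else 0)).sum
  let e := 1 + n - n_decomp
  if e = m - 1 then
    let F := ((PySem.List.max? ((PySem.List.pyRange 0 n 1).map
      (fun i => (i + 1) + pvAGet a i * m)) (fun x => x)).getD 0) - m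
    let c := F + 1
    let L := c - g
    [(L, c, g, e * L - c)]
  else []

def pvA_backtrack (m n max_genus : Int) : Nat → Int → Int → List Int → List (Int × Int × Int × Int)
  | 0, _, _, _ => []
  | fuel + 1, pos, g_so_far, a =>
    if pos = n then pvA_leaf m n a g_so_far
    else
      let max_val := max_genus - g_so_far - (n - pos - 1)
      (PySem.List.pyRange 1 (max_val + 1) 1).foldl
        (fun acc v =>
          let a' := PySem.List.pySetD a pos v
          if pvA_checkPrev m a' pos v && pvA_checkPairs m a' pos v then
            acc ++ pvA_backtrack m n max_genus fuel (pos + 1) (g_so_far + v) a'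
          else acc) []

def enumerate_d1_full (m : Int) (max_genus : Int) : List (Int × Int × Int × Int) :=
  let n := m - 1
  pvA_backtrack m n max_genus (n.toNat + 1) 0 0 (List.replicate n.toNat 0)

-- ===== PORT B =====
def pvBGet (xs : List Int) (i : Int) : Int := PySem.List.pyGetD xs i 0

def pvB_pairOk (m : Int) (pre : List Int) (v pos : Int) : Bool :=
  ((PySem.List.pyRange 0 pos 1).all (fun prev =>
    let s := (pos + 1) + (prev + 1)
    let s_mod := PySem.Int.mod s m
    if s_mod ≠ 0 ∧ s_mod - 1 ≤ pos then
      let ti := s_mod - 1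
      let bound := if ti < pos then pvBGet pre ti else v
      !(pvBGet pre prev + v < (if s < m then bound else bound + 1))
    else true))
  &&
  ((PySem.List.pyRange 0 pos 1).all (fun p1 =>
    (PySem.List.pyRange p1 pos 1).all (fun p2 =>
      let s12 := (p1 + 1) + (p2 + 1)
      if PySem.Int.mod s12 m = pos + 1 then
        !(pvBGet pre p1 + pvBGet pre p2 < (if s12 < m then v else v + 1))
      else true)))

def pvB_decomp (m n : Int) (a : List Int) (r : Int) : Bool :=
  (PySem.List.pyRange 0 n 1).any (fun i =>
    let j_res := PySem.Int.mod (r - i) m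
    decide (j_res ≠ 0) &&
      (pvBGet a i + pvBGet a (j_res - 1) + PySem.Int.floordiv (i + 1 + j_res) m == pvBGet a r))

def pvB_step (m max_genus n : Int) (fr : List (List Int × Int)) (pos : Int) : List (List Int × Int) :=
  let tail := n - pos - 1
  fr.foldl (fun nxt pg =>
    nxt ++ ((PySem.List.pyRange 1 (max_genus - pg.2 - tail + 1) 1).foldl
      (fun acc v => if pvB_pairOk m pg.1 v pos then acc ++ [(pg.1 ++ [v], pg.2 + v)] else acc) [])) []

def pvB_leaf (m n : Int) (ag : List Int × Int) : List (Int × Int × Int × Int) :=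
  let n_decomp := ((PySem.List.pyRange 0 n 1).map
    (fun r => if pvB_decomp m n ag.1 r then (1 : Int) else 0)).sum
  let e := 1 + n - n_decomp
  if e = m - 1 then
    let c := ((PySem.List.max? ((PySem.List.pyRange 0 n 1).map
      (fun i => (i + 1) + pvBGet ag.1 i * m)) (fun x => x)).getD 0) - m + 1
    let L := c - ag.2
    [(L, c, ag.2, e * L - c)]
  else []

def enumerate_d1_full_alt (m : Int) (max_genus : Int) : List (Int × Int × Int × Int) :=
  let n := m - 1
  let frontier := (PySem.List.pyRange 0 n 1).foldl (pvB_step m max_genus n) [(([] : List Int), (0 : Int))]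
  frontier.foldl (fun res ag => res ++ pvB_leaf m n ag) []

-- ===== PRECONDITION & SPEC =====
-- Pre_ excludes exactly the inputs where A raises IndexError: m ≤ 0 with a
-- nonempty first value range (it then assigns into an empty Apéry array).
def Pre_enumerate_d1_full (m : Int) (max_genus : Int) : Prop := 1 ≤ m ∨ max_genus ≤ m - 2
instance (m : Int) (max_genus : Int) : Decidable (Pre_enumerate_d1_full m max_genus) := by
  unfold Pre_enumerate_d1_full; infer_instance
def pvWitness_enumerate_d1_full : Int × Int := (3, 5)

def Spec_enumerate_d1_full (m : Int) (max_genus : Int) (out : List (Int × Int × Int × Int)) : Prop :=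
  out = enumerate_d1_full_alt m max_genus
instance (m : Int) (max_genus : Int) (out : List (Int × Int × Int × Int)) : Decidable (Spec_enumerate_d1_full m max_genus out) := by
  unfold Spec_enumerate_d1_full; infer_instance

-- ===== CLAIM (what is proved, stated in full; the proofs are below) =====
def Claim_equal_enumerate_d1_full : Prop := ∀ (m : Int) (max_genus : Int),
  Dom_enumerate_d1_full m max_genus → Pre_enumerate_d1_full m max_genus →
  Spec_enumerate_d1_full m max_genus (enumerate_d1_full m max_genus)

-- ===== LEMMAS AND PROOFS =====

theorem pv_all_congr_mem {α : Type} {l : List α} {f g : α → Bool}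
    (h : ∀ x ∈ l, f x = g x) : l.all f = l.all g := by
  induction l with
  | nil => rfl
  | cons x t ih =>
    simp only [List.all_cons, h x (by simp), ih (fun y hy => h y (by simp [hy]))]

theorem pv_get_left (xs ys : List Int) (i : Int) (h0 : 0 ≤ i) (h1 : i < (xs.length : Int)) :
    PySem.List.pyGetD (xs ++ ys) i 0 = PySem.List.pyGetD xs i 0 := by
  rw [PySem.List.pyGetD_eq_getElem _ _ h0 (by simp; omega),
      PySem.List.pyGetD_eq_getElem _ _ h0 (by omega)]
  exact List.getElem_append_left (by omega)

theorem pv_get_mid (xs : List Int) (v : Int) (ys : List Int) :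
    PySem.List.pyGetD (xs ++ v :: ys) (xs.length : Int) 0 = v := by
  rw [PySem.List.pyGetD_eq_getElem _ _ (by omega) (by simp)]
  rw [List.getElem_append_right (by simp)]
  simp

theorem pv_set_append (pre : List Int) (s0 v : Int) (suf : List Int) :
    (pre ++ s0 :: suf).set pre.length v = pre ++ v :: suf := by
  induction pre with
  | nil => rfl
  | cons x t ih =>
    show x :: ((t ++ s0 :: suf).set t.length v) = x :: (t ++ v :: suf)
    rw [ih]

theorem pv_decomp_eq (m n : Int) (a : List Int) (r : Int) :
    pvA_isDecomp m n a r = pvB_decomp m n a r := by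
  unfold pvA_isDecomp pvB_decomp
  apply PySem.List.any_congr_mem
  intro i _
  have h1 : r + 1 - (i + 1) = r - i := by ring
  simp only [h1, pvAGet, pvBGet]
  by_cases h : PySem.Int.mod (r - i) m = 0 <;> simp [h]

theorem pv_leaf_eq (m n : Int) (a : List Int) (g : Int) :
    pvA_leaf m n a g = pvB_leaf m n (a, g) := by
  unfold pvA_leaf pvB_leaf
  simp only [pv_decomp_eq, pvAGet, pvBGet]

theorem pv_check_eq (m : Int) (pre suf : List Int) (pos v : Int)
    (hm : 1 ≤ m) (hlen : (pre.length : Int) = pos) :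
    (pvA_checkPrev m (pre ++ v :: suf) pos v && pvA_checkPairs m (pre ++ v :: suf) pos v)
      = pvB_pairOk m pre v pos := by
  have hpos : 0 ≤ pos := by omega
  unfold pvA_checkPrev pvA_checkPairs pvB_pairOk
  congr 1
  · apply pv_all_congr_mem
    intro prev hprev
    rw [PySem.List.mem_pyRange_one] at hprev
    obtain ⟨hp0, hp1⟩ := hprev
    simp only
    by_cases h0 : PySem.Int.mod (pos + 1 + (prev + 1)) m = 0
    · simp [h0]
    · have hmod : PySem.Int.mod (pos + 1 + (prev + 1)) m = (pos + 1 + (prev + 1)) % m :=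
        PySem.Int.mod_eq_emod_of_pos (by omega)
      have hti0 : 0 ≤ PySem.Int.mod (pos + 1 + (prev + 1)) m - 1 := by
        have := Int.emod_nonneg (pos + 1 + (prev + 1)) (show m ≠ 0 by omega)
        omega
      by_cases h1 : PySem.Int.mod (pos + 1 + (prev + 1)) m - 1 ≤ pos
      · have hgp : pvAGet (pre ++ v :: suf) prev = pvBGet pre prev := by
          unfold pvAGet pvBGet; exact pv_get_left _ _ _ hp0 (by omega)
        have hgt : pvAGet (pre ++ v :: suf) (PySem.Int.mod (pos + 1 + (prev + 1)) m - 1)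
            = (if PySem.Int.mod (pos + 1 + (prev + 1)) m - 1 < pos
               then pvBGet pre (PySem.Int.mod (pos + 1 + (prev + 1)) m - 1) else v) := by
          by_cases hlt : PySem.Int.mod (pos + 1 + (prev + 1)) m - 1 < pos
          · rw [if_pos hlt]; unfold pvAGet pvBGet; exact pv_get_left _ _ _ hti0 (by omega)
          · rw [if_neg hlt]
            have he : PySem.Int.mod (pos + 1 + (prev + 1)) m - 1 = (pre.length : Int) := by omega
            rw [he]; unfold pvAGet; exact pv_get_mid _ _ _
        by_cases h2 : pos + 1 + (prev + 1) < m <;> simp [h0, h1, h2, hgp, hgt]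
      · simp [h0, h1]
  · apply pv_all_congr_mem
    intro p1 hp1
    rw [PySem.List.mem_pyRange_one] at hp1
    apply pv_all_congr_mem
    intro p2 hp2
    rw [PySem.List.mem_pyRange_one] at hp2
    simp only
    have g1 : pvAGet (pre ++ v :: suf) p1 = pvBGet pre p1 := by
      unfold pvAGet pvBGet; exact pv_get_left _ _ _ (by omega) (by omega)
    have g2 : pvAGet (pre ++ v :: suf) p2 = pvBGet pre p2 := by
      unfold pvAGet pvBGet; exact pv_get_left _ _ _ (by omega) (by omega)
    by_cases hq : PySem.Int.mod (p1 + 1 + (p2 + 1)) m = pos + 1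
    · by_cases h2 : p1 + 1 + (p2 + 1) < m <;> simp [hq, h2, g1, g2]
    · simp [hq]

-- children produced from one frontier entry at level pos (proof-layer view of pvB_step)
def pvB_children (m max_genus n pos : Int) (pg : List Int × Int) : List (List Int × Int) :=
  ((PySem.List.pyRange 1 (max_genus - pg.2 - (n - pos - 1) + 1) 1).filter
    (fun v => pvB_pairOk m pg.1 v pos)).map (fun v => (pg.1 ++ [v], pg.2 + v))

theorem pv_step_eq (m max_genus n : Int) (fr : List (List Int × Int)) (pos : Int) :
    pvB_step m max_genus n fr pos = fr.flatMap (pvB_children m max_genus n pos) := by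
  show fr.foldl (fun nxt pg =>
    nxt ++ ((PySem.List.pyRange 1 (max_genus - pg.2 - (n - pos - 1) + 1) 1).foldl
      (fun acc v => if pvB_pairOk m pg.1 v pos then acc ++ [(pg.1 ++ [v], pg.2 + v)] else acc) [])) []
    = fr.flatMap (pvB_children m max_genus n pos)
  rw [PySem.List.foldl_append_eq_flatMap, List.nil_append]
  congr 1
  funext pg
  unfold pvB_children
  rw [PySem.List.foldl_append_if, List.nil_append]

theorem pv_foldFrames_append (m max_genus n : Int) (ps : List Int)
    (F1 F2 : List (List Int × Int)) :
    ps.foldl (pvB_step m max_genus n) (F1 ++ F2)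
      = ps.foldl (pvB_step m max_genus n) F1 ++ ps.foldl (pvB_step m max_genus n) F2 := by
  induction ps generalizing F1 F2 with
  | nil => rfl
  | cons p ps ih =>
    simp only [List.foldl_cons]
    rw [show pvB_step m max_genus n (F1 ++ F2) p
        = pvB_step m max_genus n F1 p ++ pvB_step m max_genus n F2 p from by
      rw [pv_step_eq, pv_step_eq, pv_step_eq, List.flatMap_append]]
    exact ih _ _

theorem pv_foldFrames_nil (m max_genus n : Int) (ps : List Int) :
    ps.foldl (pvB_step m max_genus n) [] = [] := by
  induction ps with
  | nil => rfl
  | cons p ps ih =>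
    simp only [List.foldl_cons]
    rw [pv_step_eq, List.flatMap_nil]
    exact ih

theorem pv_pipeline_flatMap (m max_genus n : Int) (ps : List Int) (F : List (List Int × Int)) :
    (ps.foldl (pvB_step m max_genus n) F).flatMap (pvB_leaf m n)
      = F.flatMap (fun pg => (ps.foldl (pvB_step m max_genus n) [pg]).flatMap (pvB_leaf m n)) := by
  induction F with
  | nil => rw [pv_foldFrames_nil]; rfl
  | cons pg F ih =>
    rw [show (pg :: F) = [pg] ++ F from rfl, pv_foldFrames_append, List.flatMap_append, ih]
    rfl

theorem pv_flatMap_filter_map {α β γ : Type} (l : List α) (p : α → Bool) (f : α → β) (h : β → List γ) :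
    ((l.filter p).map f).flatMap h = l.flatMap (fun v => if p v then h (f v) else []) := by
  induction l with
  | nil => rfl
  | cons x t ih =>
    by_cases hx : p x
    · simp [hx, ih]
    · simp [hx, ih]

theorem pv_main (m max_genus : Int) (k : Nat) :
    ∀ (pos g : Int) (pre suf : List Int),
      0 ≤ pos → pos + (k : Int) = m - 1 →
      (pre.length : Int) = pos → suf.length = k →
      pvA_backtrack m (m - 1) max_genus (k + 1) pos g (pre ++ suf)
        = ((PySem.List.pyRange pos (m - 1) 1).foldl (pvB_step m max_genus (m - 1)) [(pre, g)]).flatMap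
            (pvB_leaf m (m - 1)) := by
  induction k with
  | zero =>
    intro pos g pre suf h0 hk hlen hsuf
    have hpos : pos = m - 1 := by push_cast at hk; omega
    cases suf with
    | cons s0 suf' => simp at hsuf
    | nil =>
      rw [List.append_nil]
      rw [PySem.List.pyRange_one_eq_nil (by omega)]
      simp only [List.foldl_nil, List.flatMap_cons, List.flatMap_nil, List.append_nil]
      unfold pvA_backtrack
      rw [if_pos hpos]
      exact pv_leaf_eq m (m - 1) pre g
  | succ k ih =>
    intro pos g pre suf h0 hk hlen hsuf
    cases suf with
    | nil => simp at hsuf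
    | cons s0 suf' =>
      push_cast at hk
      have hm : 1 ≤ m := by omega
      have hne : ¬ (pos = m - 1) := by omega
      have hsuf' : suf'.length = k := by simpa using hsuf
      have hgoal : pvA_backtrack m (m - 1) max_genus (k + 1 + 1) pos g (pre ++ s0 :: suf')
          = (PySem.List.pyRange 1 (max_genus - g - (m - 1 - pos - 1) + 1) 1).foldl
              (fun acc v =>
                if (pvA_checkPrev m (PySem.List.pySetD (pre ++ s0 :: suf') pos v) pos v
                    && pvA_checkPairs m (PySem.List.pySetD (pre ++ s0 :: suf') pos v) pos v) = true then
                  acc ++ pvA_backtrack m (m - 1) max_genus (k + 1) (pos + 1) (g + v)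
                    (PySem.List.pySetD (pre ++ s0 :: suf') pos v)
                else acc) [] := by
        unfold pvA_backtrack
        rw [if_neg hne]
        rfl
      rw [hgoal]
      rw [PySem.List.foldl_congr_mem _ _ (fun acc w =>
        acc ++ (if pvB_pairOk m pre w pos then
          ((PySem.List.pyRange (pos + 1) (m - 1) 1).foldl (pvB_step m max_genus (m - 1))
            [(pre ++ [w], g + w)]).flatMap (pvB_leaf m (m - 1))
        else [])) _
        (by
          intro acc w _
          simp only
          have hset : PySem.List.pySetD (pre ++ s0 :: suf') pos w = pre ++ w :: suf' := by
            rw [PySem.List.pySetD_of_nonneg _ _ h0]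
            rw [show pos.toNat = pre.length from by omega]
            exact pv_set_append pre s0 w suf'
          rw [hset, pv_check_eq m pre suf' pos w hm hlen]
          by_cases hc : pvB_pairOk m pre w pos
          · rw [if_pos hc, if_pos hc]
            congr 1
            rw [show pre ++ w :: suf' = (pre ++ [w]) ++ suf' from by simp]
            exact ih (pos + 1) (g + w) (pre ++ [w]) suf' (by omega) (by omega)
              (by simp; omega) hsuf'
          · rw [if_neg hc, if_neg hc, List.append_nil])]
      rw [PySem.List.foldl_append_eq_flatMap, List.nil_append]
      rw [PySem.List.pyRange_one_cons (by omega : pos < m - 1), List.foldl_cons]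
      rw [show pvB_step m max_genus (m - 1) [(pre, g)] pos
          = pvB_children m max_genus (m - 1) pos (pre, g) from by
        rw [pv_step_eq]; simp]
      rw [pv_pipeline_flatMap]
      unfold pvB_children
      rw [pv_flatMap_filter_map]

-- ===== VERDICT (by name: the statement is the Claim_ definition above) =====
theorem enumerate_d1_full_spec : Claim_equal_enumerate_d1_full := by
  intro m mg _ hpre
  unfold Spec_enumerate_d1_full enumerate_d1_full enumerate_d1_full_alt
  simp only
  by_cases hm : 1 ≤ m
  · have h := pv_main m mg (m - 1).toNat 0 0 [] (List.replicate (m - 1).toNat 0)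
      (by omega) (by omega) (by simp) (by simp)
    rw [List.nil_append] at h
    rw [h, PySem.List.foldl_append_eq_flatMap, List.nil_append]
  · have hmg : mg ≤ m - 2 := by
      rcases hpre with h | h
      · omega
      · exact h
    rw [show (m - 1).toNat = 0 from by omega]
    have hA : pvA_backtrack m (m - 1) mg (0 + 1) 0 0 (List.replicate 0 0) = [] := by
      have hgoal2 : pvA_backtrack m (m - 1) mg (0 + 1) 0 0 (List.replicate 0 0)
          = (PySem.List.pyRange 1 (mg - 0 - (m - 1 - 0 - 1) + 1)).foldl
              (fun acc v =>
                if (pvA_checkPrev m (PySem.List.pySetD (List.replicate 0 0) 0 v) 0 v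
                    && pvA_checkPairs m (PySem.List.pySetD (List.replicate 0 0) 0 v) 0 v) = true then
                  acc ++ pvA_backtrack m (m - 1) mg 0 (0 + 1) (0 + v)
                    (PySem.List.pySetD (List.replicate 0 0) 0 v)
                else acc) [] := by
        unfold pvA_backtrack
        rw [if_neg (by omega : ¬ ((0:Int) = m - 1))]
        rfl
      rw [hgoal2, PySem.List.pyRange_one_eq_nil (by omega : mg - 0 - (m - 1 - 0 - 1) + 1 ≤ 1)]
      rfl
    rw [hA]
    rw [PySem.List.pyRange_one_eq_nil (by omega : m - 1 ≤ 0)]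
    simp only [List.foldl_nil, List.foldl_cons, List.nil_append]
    have hB : pvB_leaf m (m - 1) ([], 0) = [] := by
      simp only [pvB_leaf, PySem.List.pyRange_one_eq_nil (by omega : m - 1 ≤ (0:Int)),
        List.map_nil, List.sum_nil]
      split_ifs with h
      · exact absurd h (by omega)
      · rfl
    exact hB.symm
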